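-- pv_equiv track=rewrite | github.com/qverg/Parakeet-Chess-Engine | bitboard_generator.py | squareListToBitString
-- ===== SOURCE A (Python) =====
-- def squareListToBitString(squares: list[int]) -> str:
--     bitString = ""
--     for i in range(64):
--         if i in squares:
--             bitString = "1" + bitString
--         else:
--             bitString = "0" + bitString
--     return bitString
-- ===== SOURCE B (Python) =====
-- def squareListToBitString(squares: list[int]) -> str:
--     num = 0
--     for s in squares:
--         if 0 <= s < 64:
--             num |= 1 << s
--     return format(num, '064b')
-- ===== Notes on version B (the rewrite author's own statement) =====
-- stated objective: faster
-- what changed: B builds an integer bitmask in one pass over the squares list and formats it as a 64-bit binary string, instead of A's 64-iteration loop with a membership scan of squares at every position.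
import Mathlib
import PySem

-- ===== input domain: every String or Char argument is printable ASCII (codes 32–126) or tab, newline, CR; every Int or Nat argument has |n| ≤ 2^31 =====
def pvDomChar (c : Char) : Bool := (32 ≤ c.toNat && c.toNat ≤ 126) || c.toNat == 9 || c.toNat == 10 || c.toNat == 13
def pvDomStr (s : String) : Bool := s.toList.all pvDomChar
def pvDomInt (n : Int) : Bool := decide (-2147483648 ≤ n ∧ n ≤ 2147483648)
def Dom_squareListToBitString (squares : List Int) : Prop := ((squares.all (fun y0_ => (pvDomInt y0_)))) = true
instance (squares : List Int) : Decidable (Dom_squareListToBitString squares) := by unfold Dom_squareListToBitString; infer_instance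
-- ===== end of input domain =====

-- B builds an integer bitmask in one pass over squares and formats it with 64 binary digits, replacing A's 64-position loop that scans squares at every position; faster for long square lists.


-- ===== PORT A =====
-- A: for i in range(64): prepend '1' if i in squares else '0'
def squareListToBitString (squares : List Int) : String :=
  String.mk ((PySem.List.pyRange 0 64 1).foldl
    (fun acc i => (if i ∈ squares then '1' else '0') :: acc) [])

-- ===== PORT B =====
-- B: num |= 1 << s for each in-range s; format(num, '064b') ported as the
-- 64 MSB-first binary digits of num (exact: num < 2^64 by construction).
def squareListToBitString_alt (squares : List Int) : String :=
  let num : Nat := squares.foldl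
    (fun (n : Nat) (s : Int) => if 0 ≤ s ∧ s < 64 then n ||| (1 <<< s.toNat) else n) 0
  String.mk ((List.range 64).map (fun k => if num.testBit (63 - k) then '1' else '0'))

-- ===== PRECONDITION & SPEC =====
def Spec_squareListToBitString (squares : List Int) (out : String) : Prop := out = squareListToBitString_alt squares
instance (squares : List Int) (out : String) : Decidable (Spec_squareListToBitString squares out) := by unfold Spec_squareListToBitString; infer_instance

-- ===== CLAIM (what is proved, stated in full; the proofs are below) =====
def Claim_equal_squareListToBitString : Prop := ∀ (squares : List Int), Dom_squareListToBitString squares → Spec_squareListToBitString squares (squareListToBitString squares)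

-- ===== LEMMAS AND PROOFS =====

-- A's prepend-loop builds the reversed map.
theorem foldl_prepend (f : Int → Char) :
    ∀ (l : List Int) (acc : List Char),
      l.foldl (fun acc i => f i :: acc) acc = (l.map f).reverse ++ acc := by
  intro l
  induction l with
  | nil => intro acc; simp
  | cons x xs ih => intro acc; simp [List.foldl, ih]

-- B's bitmask accumulator: which bits are set.
theorem testBit_fold (t : Nat) :
    ∀ (l : List Int) (n : Nat),
      (l.foldl (fun (n : Nat) (s : Int) => if 0 ≤ s ∧ s < 64 then n ||| (1 <<< s.toNat) else n) n).testBit t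
        = (n.testBit t || decide ((t : Int) ∈ l ∧ t < 64)) := by
  intro l
  induction l with
  | nil => intro n; simp
  | cons x xs ih =>
      intro n
      simp only [List.foldl_cons, ih]
      by_cases hx : 0 ≤ x ∧ x < 64
      · rw [if_pos hx]
        have h1 : (1 : Nat) <<< x.toNat = 2 ^ x.toNat := by
          simp [Nat.shiftLeft_eq]
        rw [h1, Nat.testBit_or]
        by_cases he : (t : Int) = x
        · have hxt : x.toNat = t := by omega
          have ht64 : t < 64 := by omega
          simp [hxt, Nat.testBit_two_pow_self, he, ht64]
        · have hne : x.toNat ≠ t := by omega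
          rw [Nat.testBit_two_pow_of_ne hne]
          simp only [Bool.or_false]
          congr 1
          simp only [List.mem_cons]
          by_cases ht64 : t < 64 <;> simp [he, ht64]
      · rw [if_neg hx]
        congr 1
        simp only [List.mem_cons]
        by_cases ht64 : t < 64
        · have hne : (t : Int) ≠ x := by
            intro h; exact hx ⟨by omega, by omega⟩
          simp [hne, ht64]
        · simp [ht64]

theorem squareListToBitString_spec : Claim_equal_squareListToBitString := by
  unfold Claim_equal_squareListToBitString
  intro squares _
  unfold Spec_squareListToBitString squareListToBitString squareListToBitString_alt
  congr 1
  rw [foldl_prepend, List.append_nil, PySem.List.pyRange_one]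
  apply List.ext_getElem
  · simp
  · intro j h1 h2
    simp only [List.length_reverse, List.length_map, List.length_range] at h1 h2
    have h64 : (64 - 0 : Int).toNat = 64 := by decide
    rw [h64] at h1
    rw [List.getElem_reverse, List.getElem_map, List.getElem_map, List.getElem_range,
        List.getElem_map, List.getElem_range]
    rw [testBit_fold]
    simp only [List.length_map, List.length_range, h64, Nat.zero_testBit,
      Bool.false_or, Int.zero_add]
    have hj : 64 - 1 - j = 63 - j := by omega
    have hlt : 63 - j < 64 := by omega
    rw [hj]
    by_cases hm : ((63 - j : Nat) : Int) ∈ squares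
    · simp [hm, hlt]
    · simp [hm]

-- ===== VERDICT (by name: the statement is the Claim_ definition above) =====
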